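-- pv_equiv track=rewrite | github.com/LaVillaStran/Atividades-da-UFPB | Strings/Questao3.py | numero_telefone
-- ===== SOURCE A (Python) =====
-- def numero_telefone(frase):
--     if len(frase) == 8:
--         frase_nova ="9"
--
--     else:
--         frase_nova =""
--
--     for i in range(len(frase)):
--         frase_nova += frase[i]
--         if len(frase_nova) == 5:
--             frase_nova += "-"
--
--     return frase_nova
-- ===== SOURCE B (Python) =====
-- def numero_telefone(frase):
--     s = ("9" if len(frase) == 8 else "") + frase
--     return s[:5] + "-" + s[5:] if len(s) >= 5 else s
-- ===== Notes on version B (the rewrite author's own statement) =====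
-- stated objective: simpler
-- what changed: Replaces the character-by-character building loop with its inner length check by one prefix concatenation and a single slice insertion of the dash (no quadratic repeated string concatenation).
import Mathlib
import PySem

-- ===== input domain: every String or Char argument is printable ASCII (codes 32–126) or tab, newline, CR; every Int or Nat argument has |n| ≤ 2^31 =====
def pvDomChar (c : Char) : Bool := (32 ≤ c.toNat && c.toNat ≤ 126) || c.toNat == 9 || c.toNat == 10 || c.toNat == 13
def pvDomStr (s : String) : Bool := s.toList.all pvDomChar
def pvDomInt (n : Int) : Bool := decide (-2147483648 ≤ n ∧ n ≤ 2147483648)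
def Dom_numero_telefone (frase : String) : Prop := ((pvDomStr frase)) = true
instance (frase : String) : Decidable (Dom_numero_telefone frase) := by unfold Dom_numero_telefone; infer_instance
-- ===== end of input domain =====

-- B replaces A's char-by-char building loop (with its per-step length check) by one
-- prefix concatenation and a single slice insertion of the dash; equivalence on all inputs.

-- ===== PORT A =====
-- loop body of A: append the character, then append '-' when the accumulator reaches length 5
def pvStepA (acc : List Char) (c : Char) : List Char :=
  let acc' := acc ++ [c]
  if acc'.length == 5 then acc' ++ ['-'] else acc'

def numero_telefone (frase : String) : String :=
  String.ofList (frase.toList.foldl pvStepA (if frase.toList.length == 8 then ['9'] else []))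

-- ===== PORT B =====
-- B's helper expression: insert the dash after the fifth character by slicing, if long enough
def pvInsertDash (s : List Char) : String :=
  if 5 ≤ s.length then String.ofList (s.take 5 ++ '-' :: s.drop 5) else String.ofList s

def numero_telefone_alt (frase : String) : String :=
  pvInsertDash ((if frase.toList.length == 8 then ['9'] else []) ++ frase.toList)

-- ===== PRECONDITION & SPEC =====
def Spec_numero_telefone (frase : String) (out : String) : Prop := out = numero_telefone_alt frase
instance (frase : String) (out : String) : Decidable (Spec_numero_telefone frase out) := by unfold Spec_numero_telefone; infer_instance

-- ===== CLAIM (what is proved, stated in full; the proofs are below) =====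
def Claim_equal_numero_telefone : Prop := ∀ (frase : String), Dom_numero_telefone frase → Spec_numero_telefone frase (numero_telefone frase)

-- ===== LEMMAS AND PROOFS =====

-- once the accumulator is past length 5 the dash branch can never fire again
theorem foldl_stepA_of_long (l : List Char) (acc : List Char) (h : 5 ≤ acc.length) :
    l.foldl pvStepA acc = acc ++ l := by
  induction l generalizing acc with
  | nil => simp
  | cons c l ih =>
      have h4 : acc.length ≠ 4 := by omega
      have hstep : pvStepA acc c = acc ++ [c] := by simp [pvStepA, h4]
      rw [List.foldl_cons, hstep, ih _ (by simp; omega)]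
      simp

-- main loop invariant: starting below length 5, the loop inserts the dash exactly after
-- the fifth character iff the total reaches 5, else just appends everything
theorem foldl_stepA (l : List Char) (acc : List Char) (h : acc.length < 5) :
    l.foldl pvStepA acc =
      if 5 ≤ acc.length + l.length then
        (acc ++ l).take 5 ++ '-' :: (acc ++ l).drop 5
      else acc ++ l := by
  induction l generalizing acc with
  | nil => simp; omega
  | cons c l ih =>
      by_cases h4 : acc.length = 4
      · have hstep : pvStepA acc c = acc ++ [c] ++ ['-'] := by simp [pvStepA, h4]
        rw [List.foldl_cons, hstep, foldl_stepA_of_long _ _ (by simp [h4])]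
        rw [if_pos (by simp [h4]; omega)]
        have hlen5 : (acc ++ [c]).length = 5 := by simp [h4]
        have htake : (acc ++ c :: l).take 5 = acc ++ [c] := by
          rw [← hlen5, show acc ++ c :: l = (acc ++ [c]) ++ l by simp]
          exact List.take_left ..
        have hdrop : (acc ++ c :: l).drop 5 = l := by
          rw [← hlen5, show acc ++ c :: l = (acc ++ [c]) ++ l by simp]
          exact List.drop_left ..
        rw [htake, hdrop]; simp
      · have hstep : pvStepA acc c = acc ++ [c] := by simp [pvStepA, h4]
        rw [List.foldl_cons, hstep, ih _ (by simp; omega)]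
        have hEq : acc ++ [c] ++ l = acc ++ c :: l := by simp
        have hLen : (acc ++ [c]).length + l.length = acc.length + (c :: l).length := by
          simp; omega
        rw [hEq, hLen]

-- ===== VERDICT (by name: the statement is the Claim_ definition above) =====
theorem numero_telefone_spec : Claim_equal_numero_telefone := by
  intro frase _
  unfold Spec_numero_telefone numero_telefone numero_telefone_alt pvInsertDash
  have hinit : (if frase.toList.length == 8 then ['9'] else []).length < 5 := by
    split <;> simp
  rw [foldl_stepA _ _ hinit]
  simp only [List.length_append]
  split <;> (rw [apply_ite String.ofList])
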